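-- pv_equiv track=rewrite | github.com/smallwanderer/joooooon | 프로그래머스/2/389480. 완전범죄/완전범죄.py | solution
-- ===== SOURCE A (Python) =====
-- def solution(info, n, m):
--     dp = set()
--     dp.add((0, 0))
--
--     for a_val, b_val in info:
--         next_dp = set()
--         for a_sum, b_sum in dp:
--             if a_sum + a_val < n:
--                 next_dp.add((a_sum + a_val, b_sum))
--             if b_sum + b_val < m:
--                 next_dp.add((a_sum, b_sum + b_val))
--         dp = next_dp
--
--     if not dp:
--         return -1
--     return min(a for a, _ in dp)
-- ===== SOURCE B (Python) =====
-- def solution(info, n, m):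
--     # dp maps b_sum -> minimal a_sum reaching it; each round: list all candidate
--     # successor states, then min-reduce the candidate list back into a dict.
--     dp = {0: 0}
--     for av, bv in info:
--         cands = [(b, a + av) for b, a in dp.items() if a + av < n] + \
--                 [(b + bv, a) for b, a in dp.items() if b + bv < m]
--         nxt = {}
--         for b, a in cands:
--             if b not in nxt or a < nxt[b]:
--                 nxt[b] = a
--         dp = nxt
--     return min(dp.values()) if dp else -1
-- ===== Notes on version B (the rewrite author's own statement) =====
-- stated objective: faster
-- what changed: Replaces A's set of reachable (a_sum,b_sum) pairs by a DP keyed by b_sum keeping only the minimal a_sum per b_sum: each round lists candidate successor states with two comprehensions and min-reduces them into a dict, so dominated states disappear and a round costs O(#distinct b_sums) instead of O(#reachable pairs).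
import Mathlib
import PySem

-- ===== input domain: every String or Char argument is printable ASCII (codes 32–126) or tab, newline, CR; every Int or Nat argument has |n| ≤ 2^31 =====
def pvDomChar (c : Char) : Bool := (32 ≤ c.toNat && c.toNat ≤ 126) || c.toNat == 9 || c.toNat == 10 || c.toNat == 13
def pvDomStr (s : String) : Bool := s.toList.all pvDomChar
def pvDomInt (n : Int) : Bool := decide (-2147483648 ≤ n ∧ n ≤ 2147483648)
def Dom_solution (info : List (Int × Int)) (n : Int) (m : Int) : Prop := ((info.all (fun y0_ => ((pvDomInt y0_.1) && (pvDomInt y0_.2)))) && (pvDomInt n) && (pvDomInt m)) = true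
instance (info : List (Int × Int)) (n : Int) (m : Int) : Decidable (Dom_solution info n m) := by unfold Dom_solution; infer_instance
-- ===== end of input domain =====

-- B replaces A's set of reachable (a_sum,b_sum) pairs by a per-round candidate list that is
-- min-reduced into a dict keyed by b_sum (minimal a_sum per b_sum; dominated states dropped).


-- ===== PORT A =====
-- inner-loop body of A: conditionally add the two successor pairs of p to next_dp
def stepA (n m av bv : Int) (nxt : PySem.Set (Int × Int)) (p : Int × Int) : PySem.Set (Int × Int) :=
  let nxt := if p.1 + av < n then PySem.Set.add nxt (p.1 + av, p.2) else nxt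
  if p.2 + bv < m then PySem.Set.add nxt (p.1, p.2 + bv) else nxt

def solution (info : List (Int × Int)) (n : Int) (m : Int) : Int :=
  let dp : PySem.Set (Int × Int) := PySem.Set.add PySem.Set.empty (0, 0)
  let dp := info.foldl (fun dp ab => dp.foldl (stepA n m ab.1 ab.2) PySem.Set.empty) dp
  if dp = [] then -1
  else (PySem.List.min? (dp.map Prod.fst) (fun x => x)).getD 0  -- guarded: dp nonempty, min? is some

-- ===== PORT B =====
-- the two candidate comprehensions of Source B, concatenated; entries are (b_sum, a_sum)
def candsB (n m av bv : Int) (items : List (Int × Int)) : List (Int × Int) :=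
  (items.filterMap fun e => if e.2 + av < n then some (e.1, e.2 + av) else none) ++
  (items.filterMap fun e => if e.1 + bv < m then some (e.1 + bv, e.2) else none)

-- Source B's reduce loop: nxt[b] = a unless nxt already holds a smaller value at b
def reduceMin (cs : List (Int × Int)) : PySem.Dict Int Int :=
  cs.foldl (fun nxt c =>
    match nxt.get? c.1 with
    | none => nxt.insert c.1 c.2
    | some cur => if c.2 < cur then nxt.insert c.1 c.2 else nxt) PySem.Dict.empty

def solution_alt (info : List (Int × Int)) (n : Int) (m : Int) : Int :=
  let dp : PySem.Dict Int Int := (PySem.Dict.empty).insert 0 0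
  let dp := info.foldl (fun dp ab => reduceMin (candsB n m ab.1 ab.2 dp.items)) dp
  if dp.items = [] then -1
  else (PySem.List.min? dp.values (fun x => x)).getD 0  -- guarded: dp nonempty, min? is some

-- ===== PRECONDITION & SPEC =====
def Spec_solution (info : List (Int × Int)) (n : Int) (m : Int) (out : Int) : Prop := out = solution_alt info n m
instance (info : List (Int × Int)) (n : Int) (m : Int) (out : Int) : Decidable (Spec_solution info n m out) := by unfold Spec_solution; infer_instance

-- ===== CLAIM (what is proved, stated in full; the proofs are below) =====
def Claim_equal_solution : Prop := ∀ (info : List (Int × Int)) (n : Int) (m : Int), Dom_solution info n m → Spec_solution info n m (solution info n m)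

-- ===== LEMMAS AND PROOFS =====

-- the relation maintained between A's pair set s and B's dict d, round by round
def RelSD (s : PySem.Set (Int × Int)) (d : PySem.Dict Int Int) : Prop :=
  d.keys.Nodup ∧
  (∀ p ∈ s, ∃ v, d.get? p.2 = some v ∧ v ≤ p.1) ∧
  (∀ b v, d.get? b = some v → (v, b) ∈ s)

-- the step function of reduceMin, named for the lemmas
def redStep (nxt : PySem.Dict Int Int) (c : Int × Int) : PySem.Dict Int Int :=
  match nxt.get? c.1 with
  | none => nxt.insert c.1 c.2
  | some cur => if c.2 < cur then nxt.insert c.1 c.2 else nxt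

theorem reduceMin_eq (cs : List (Int × Int)) : reduceMin cs = cs.foldl redStep PySem.Dict.empty := rfl

theorem get?_redStep_of_ne (d : PySem.Dict Int Int) (c : Int × Int) (k : Int) (h : k ≠ c.1) :
    (redStep d c).get? k = d.get? k := by
  unfold redStep
  cases hg : d.get? c.1 with
  | none => exact PySem.Dict.get?_insert_of_ne d c.2 h
  | some cur =>
    by_cases hv : c.2 < cur
    · simp only [hv, if_true]; exact PySem.Dict.get?_insert_of_ne d c.2 h
    · simp only [hv, if_false]

theorem redStep_self_le (d : PySem.Dict Int Int) (c : Int × Int) :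
    ∃ w ≤ c.2, (redStep d c).get? c.1 = some w := by
  unfold redStep
  cases hg : d.get? c.1 with
  | none => exact ⟨c.2, le_refl _, PySem.Dict.get?_insert_self d c.1 c.2⟩
  | some cur =>
    by_cases hv : c.2 < cur
    · exact ⟨c.2, le_refl _, by simp only [hv, if_true]; exact PySem.Dict.get?_insert_self d c.1 c.2⟩
    · exact ⟨cur, by omega, by simp only [hv, if_false]; exact hg⟩

theorem redStep_mono (d : PySem.Dict Int Int) (c : Int × Int) (k w : Int)
    (h : d.get? k = some w) : ∃ w' ≤ w, (redStep d c).get? k = some w' := by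
  by_cases hk : k = c.1
  · subst hk
    unfold redStep
    rw [h]
    by_cases hv : c.2 < w
    · exact ⟨c.2, by omega, by simp only [hv, if_true]; exact PySem.Dict.get?_insert_self d _ c.2⟩
    · exact ⟨w, le_refl w, by simp only [hv, if_false]; exact h⟩
  · exact ⟨w, le_refl w, by rw [get?_redStep_of_ne d c k hk]; exact h⟩

theorem redStep_src (d : PySem.Dict Int Int) (c : Int × Int) (k w : Int)
    (h : (redStep d c).get? k = some w) : d.get? k = some w ∨ (k, w) = c := by
  by_cases hk : k = c.1
  · subst hk
    unfold redStep at h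
    cases hg : d.get? c.1 with
    | none =>
      rw [hg] at h; dsimp only at h
      rw [PySem.Dict.get?_insert_self] at h
      cases h; exact Or.inr rfl
    | some cur =>
      rw [hg] at h; dsimp only at h
      by_cases hv : c.2 < cur
      · rw [if_pos hv, PySem.Dict.get?_insert_self] at h
        cases h; exact Or.inr rfl
      · rw [if_neg hv, hg] at h; exact Or.inl h
  · rw [get?_redStep_of_ne d c k hk] at h; exact Or.inl h

theorem nodup_keys_redStep (d : PySem.Dict Int Int) (c : Int × Int) (h : d.keys.Nodup) :
    (redStep d c).keys.Nodup := by
  unfold redStep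
  cases d.get? c.1 with
  | none => exact PySem.Dict.nodup_keys_insert _ _ _ h
  | some cur =>
    by_cases hv : c.2 < cur
    · simp only [hv, if_true]; exact PySem.Dict.nodup_keys_insert _ _ _ h
    · simpa only [hv, if_false] using h

-- ---- the reduce fold over a candidate list ----
theorem foldRed_mono (cs : List (Int × Int)) (d : PySem.Dict Int Int) (k w : Int)
    (h : d.get? k = some w) : ∃ w' ≤ w, (cs.foldl redStep d).get? k = some w' := by
  induction cs generalizing d w with
  | nil => exact ⟨w, le_refl w, h⟩
  | cons c t ih =>
    obtain ⟨w1, hle1, hg1⟩ := redStep_mono d c k w h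
    obtain ⟨w2, hle2, hg2⟩ := ih _ _ hg1
    exact ⟨w2, by omega, hg2⟩

theorem foldRed_src (cs : List (Int × Int)) (d : PySem.Dict Int Int) (k w : Int)
    (h : (cs.foldl redStep d).get? k = some w) : d.get? k = some w ∨ (k, w) ∈ cs := by
  induction cs generalizing d with
  | nil => exact Or.inl h
  | cons c t ih =>
    rcases ih _ h with h' | hm
    · rcases redStep_src d c k w h' with h'' | hc
      · exact Or.inl h''
      · exact Or.inr (hc ▸ List.mem_cons_self)
    · exact Or.inr (List.mem_cons_of_mem _ hm)

theorem foldRed_cand (cs : List (Int × Int)) (d : PySem.Dict Int Int) (c : Int × Int)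
    (hc : c ∈ cs) : ∃ w ≤ c.2, (cs.foldl redStep d).get? c.1 = some w := by
  induction cs generalizing d with
  | nil => cases hc
  | cons c0 t ih =>
    rcases List.mem_cons.mp hc with rfl | ht
    · obtain ⟨w0, hle0, hg0⟩ := redStep_self_le d c
      obtain ⟨w1, hle1, hg1⟩ := foldRed_mono t _ c.1 w0 hg0
      exact ⟨w1, by omega, hg1⟩
    · exact ih _ ht

theorem nodup_keys_foldRed (cs : List (Int × Int)) (d : PySem.Dict Int Int)
    (h : d.keys.Nodup) : (cs.foldl redStep d).keys.Nodup := by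
  induction cs generalizing d with
  | nil => exact h
  | cons c t ih => exact ih _ (nodup_keys_redStep d c h)

-- ---- membership in the candidate list ----
theorem mem_candsB (n m av bv : Int) (items : List (Int × Int)) (c : Int × Int) :
    c ∈ candsB n m av bv items ↔
      ∃ e ∈ items, (e.2 + av < n ∧ c = (e.1, e.2 + av)) ∨ (e.1 + bv < m ∧ c = (e.1 + bv, e.2)) := by
  unfold candsB
  simp only [List.mem_append, List.mem_filterMap]
  constructor
  · rintro (⟨e, he, hc⟩ | ⟨e, he, hc⟩)
    · by_cases h1 : e.2 + av < n
      · rw [if_pos h1] at hc; cases hc; exact ⟨e, he, Or.inl ⟨h1, rfl⟩⟩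
      · rw [if_neg h1] at hc; cases hc
    · by_cases h2 : e.1 + bv < m
      · rw [if_pos h2] at hc; cases hc; exact ⟨e, he, Or.inr ⟨h2, rfl⟩⟩
      · rw [if_neg h2] at hc; cases hc
  · rintro ⟨e, he, ⟨h1, rfl⟩ | ⟨h2, rfl⟩⟩
    · exact Or.inl ⟨e, he, by rw [if_pos h1]⟩
    · exact Or.inr ⟨e, he, by rw [if_pos h2]⟩

-- ---- inner fold (A) membership ----
theorem mem_stepA (n m av bv : Int) (s : PySem.Set (Int × Int)) (p q : Int × Int) :
    q ∈ stepA n m av bv s p ↔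
      q ∈ s ∨ (p.1 + av < n ∧ q = (p.1 + av, p.2)) ∨ (p.2 + bv < m ∧ q = (p.1, p.2 + bv)) := by
  unfold stepA
  by_cases h1 : p.1 + av < n <;> by_cases h2 : p.2 + bv < m <;>
    simp only [h1, h2, if_true, if_false, PySem.Set.mem_add] <;> tauto

theorem mem_foldA (n m av bv : Int) (L : List (Int × Int)) (s : PySem.Set (Int × Int))
    (q : Int × Int) :
    q ∈ L.foldl (stepA n m av bv) s ↔
      q ∈ s ∨ ∃ p ∈ L, (p.1 + av < n ∧ q = (p.1 + av, p.2)) ∨ (p.2 + bv < m ∧ q = (p.1, p.2 + bv)) := by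
  induction L generalizing s with
  | nil => simp
  | cons p t ih =>
    simp only [List.foldl_cons, ih, mem_stepA, List.mem_cons]
    constructor
    · rintro ((h | h) | ⟨p', hp', hc⟩)
      · exact Or.inl h
      · exact Or.inr ⟨p, Or.inl rfl, h⟩
      · exact Or.inr ⟨p', Or.inr hp', hc⟩
    · rintro (h | ⟨p', (rfl | hp'), hc⟩)
      · exact Or.inl (Or.inl h)
      · exact Or.inl (Or.inr hc)
      · exact Or.inr ⟨p', hp', hc⟩

-- ---- one outer round preserves RelSD ----
theorem RelSD_round (n m av bv : Int) (s : PySem.Set (Int × Int)) (d : PySem.Dict Int Int)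
    (hR : RelSD s d) :
    RelSD (s.foldl (stepA n m av bv) PySem.Set.empty)
        (reduceMin (candsB n m av bv d.items)) := by
  obtain ⟨hnd, hAB, hBA⟩ := hR
  rw [reduceMin_eq]
  refine ⟨nodup_keys_foldRed _ _ (by simp [PySem.Dict.keys_empty]), ?_, ?_⟩
  · intro p' hp'
    rcases (mem_foldA n m av bv s PySem.Set.empty p').mp hp' with h | ⟨p, hp, hc⟩
    · simp [PySem.Set.empty] at h
    · obtain ⟨v, hv, hvle⟩ := hAB p hp
      have hmem : (p.2, v) ∈ d.items := PySem.Dict.mem_items_of_get?_eq_some d hv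
      rcases hc with ⟨h1, rfl⟩ | ⟨h2, rfl⟩
      · have hcand : ((p.2 : Int), v + av) ∈ candsB n m av bv d.items :=
          (mem_candsB n m av bv d.items _).mpr ⟨(p.2, v), hmem, Or.inl ⟨by simp only; omega, by simp⟩⟩
        obtain ⟨w, hwle, hw⟩ := foldRed_cand _ PySem.Dict.empty _ hcand
        exact ⟨w, hw, by simp only at hwle ⊢; omega⟩
      · have hcand : ((p.2 + bv : Int), v) ∈ candsB n m av bv d.items :=
          (mem_candsB n m av bv d.items _).mpr ⟨(p.2, v), hmem, Or.inr ⟨by simpa only using h2, by simp⟩⟩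
        obtain ⟨w, hwle, hw⟩ := foldRed_cand _ PySem.Dict.empty _ hcand
        exact ⟨w, hw, by simp only at hwle ⊢; omega⟩
  · intro b w hw
    rcases foldRed_src _ PySem.Dict.empty b w hw with h | hm
    · rw [PySem.Dict.get?_empty] at h; cases h
    · obtain ⟨e, he, hc⟩ := (mem_candsB n m av bv d.items _).mp hm
      have hge : d.get? e.1 = some e.2 := PySem.Dict.get?_of_mem_items d (by cases e; exact he) hnd
      have hs : (e.2, e.1) ∈ s := hBA e.1 e.2 hge
      rcases hc with ⟨h1, hbw⟩ | ⟨h2, hbw⟩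
      · cases hbw
        exact (mem_foldA n m av bv s PySem.Set.empty _).mpr
          (Or.inr ⟨(e.2, e.1), hs, Or.inl ⟨by simpa only using h1, by simp⟩⟩)
      · cases hbw
        exact (mem_foldA n m av bv s PySem.Set.empty _).mpr
          (Or.inr ⟨(e.2, e.1), hs, Or.inr ⟨by simpa only using h2, by simp⟩⟩)

-- ---- the whole loop preserves RelSD ----
theorem RelSD_loop (n m : Int) (info : List (Int × Int)) (s : PySem.Set (Int × Int))
    (d : PySem.Dict Int Int) (hR : RelSD s d) :
    RelSD (info.foldl (fun dp ab => dp.foldl (stepA n m ab.1 ab.2) PySem.Set.empty) s)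
        (info.foldl (fun dp ab => reduceMin (candsB n m ab.1 ab.2 dp.items)) d) := by
  induction info generalizing s d with
  | nil => exact hR
  | cons ab t ih => exact ih _ _ (RelSD_round n m ab.1 ab.2 s d hR)

-- ---- from RelSD to equal answers ----
theorem final_of_RelSD (s : PySem.Set (Int × Int)) (d : PySem.Dict Int Int) (hR : RelSD s d) :
    (if s = [] then (-1 : Int) else (PySem.List.min? (s.map Prod.fst) (fun x => x)).getD 0) =
    (if d.items = [] then (-1 : Int) else (PySem.List.min? d.values (fun x => x)).getD 0) := by
  obtain ⟨hnd, hAB, hBA⟩ := hR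
  by_cases hs : s = []
  · subst hs
    have hd : d.items = [] := by
      cases hitems : d.items with
      | nil => rfl
      | cons e t =>
        exfalso
        have hge : d.get? e.1 = some e.2 :=
          PySem.Dict.get?_of_mem_items d (by rw [hitems]; cases e; exact List.mem_cons_self) hnd
        exact List.not_mem_nil (hBA e.1 e.2 hge)
    simp [hd]
  · have hd : d.items ≠ [] := by
      obtain ⟨p, hp⟩ := List.exists_mem_of_ne_nil s hs
      obtain ⟨v, hv, _⟩ := hAB p hp
      have hmem := PySem.Dict.mem_items_of_get?_eq_some d hv
      intro hnil; rw [hnil] at hmem; exact List.not_mem_nil hmem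
    simp only [hs, hd, if_false]
    cases hma : PySem.List.min? (s.map Prod.fst) (fun x => x) with
    | none =>
      exact absurd (by simpa using (PySem.List.min?_eq_none_iff _ _).mp hma) hs
    | some ma =>
      cases hmb : PySem.List.min? d.values (fun x => x) with
      | none =>
        have : d.values = [] := (PySem.List.min?_eq_none_iff _ _).mp hmb
        exact absurd (by simpa [PySem.Dict.values] using this) hd
      | some mb =>
        simp only [Option.getD_some]
        have hmb_mem : mb ∈ d.values := PySem.List.min?_mem hmb
        obtain ⟨e, he, heq⟩ := by
          simpa only [PySem.Dict.values, List.mem_map] using hmb_mem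
        have hge : d.get? e.1 = some e.2 :=
          PySem.Dict.get?_of_mem_items d (by cases e; exact he) hnd
        have hsmem : (e.2, e.1) ∈ s := hBA e.1 e.2 hge
        have h1 : ma ≤ mb := by
          have hle : ma ≤ e.2 :=
            PySem.List.min?_isMin hma e.2 (List.mem_map.mpr ⟨(e.2, e.1), hsmem, rfl⟩)
          omega
        have hma_mem : ma ∈ s.map Prod.fst := PySem.List.min?_mem hma
        obtain ⟨p, hp, hpeq⟩ := List.mem_map.mp hma_mem
        obtain ⟨v, hv, hvle⟩ := hAB p hp
        have hmemv : v ∈ d.values := by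
          have hmem := PySem.Dict.mem_items_of_get?_eq_some d hv
          exact List.mem_map.mpr ⟨(p.2, v), hmem, rfl⟩
        have h2 : mb ≤ v := PySem.List.min?_isMin hmb v hmemv
        omega

-- ===== VERDICT (by name: the statement is the Claim_ definition above) =====
theorem solution_spec : Claim_equal_solution := by
  intro info n m _
  unfold Spec_solution solution solution_alt
  have hR0 : RelSD (PySem.Set.add PySem.Set.empty (0, 0)) ((PySem.Dict.empty).insert 0 0) := by
    refine ⟨PySem.Dict.nodup_keys_insert _ _ _ (by simp [PySem.Dict.keys_empty]), ?_, ?_⟩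
    · intro p hp
      simp only [PySem.Set.add, PySem.Set.empty] at hp
      simp at hp
      subst hp
      exact ⟨0, PySem.Dict.get?_insert_self _ _ _, le_refl 0⟩
    · intro b v hv
      rw [PySem.Dict.get?_insert] at hv
      by_cases hb : b = 0
      · rw [if_pos hb] at hv
        cases hv
        subst hb
        simp [PySem.Set.add, PySem.Set.empty]
      · rw [if_neg hb, PySem.Dict.get?_empty] at hv
        cases hv
  exact final_of_RelSD _ _ (RelSD_loop n m info _ _ hR0)
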